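-- pv_equiv track=rewrite | github.com/lzeeorno/396 | as8/hackRSA.py | blockSizeHack
-- ===== SOURCE A (Python) =====
-- def blockSizeHack(blocks, n, e):
--     SYMBOLS = 'ABCDEFGHIJKLMNOPQRSTUVWXYZabcdefghijklmnopqrstuvwxyz1234567890 !?.'
--     string = []
--     p = 0
--     q = 0
--     for i in range(2, n):
--         if n % i == 0:
--             p = i
--             q = n//p
--             break
--     x = (p-1)*(q-1)
--     y = 1
--     d = 0
--     while (((x * y) + 1) % e) != 0:
--         y += 1
--     d = (x * y + 1) // e
--     for i in range(len(blocks)):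
--         blockInt = pow(blocks[i], d, n)
--         if blockInt < len(SYMBOLS)**i and blockInt != 0:
--             blockInt = blockInt % (len(SYMBOLS)**i)
--         else:
--             blockInt = blockInt // (len(SYMBOLS)**i)
--         string.append(SYMBOLS[blockInt])
--     return ''.join(string)
-- ===== SOURCE B (Python) =====
-- def blockSizeHack(blocks, n, e):
--     SYMBOLS = 'ABCDEFGHIJKLMNOPQRSTUVWXYZabcdefghijklmnopqrstuvwxyz1234567890 !?.'
--     # factor n by trial division up to sqrt(n) (p = q = 0 when no factor exists, as in the original)
--     p = 0
--     q = 0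
--     i = 2
--     while i * i <= n:
--         if n % i == 0:
--             p = i
--             q = n // i
--             break
--         i += 1
--     x = (p - 1) * (q - 1)
--     # smallest y >= 1 with e | x*y + 1, via extended Euclid instead of a linear scan
--     r0, r1 = e, x % e
--     s0, s1 = 0, 1
--     while r1:
--         k = r0 // r1
--         r0, r1 = r1, r0 - k * r1
--         s0, s1 = s1, s0 - k * s1
--     if r0 != 1:
--         raise ValueError('e is not invertible modulo phi(n)')
--     y = (-s0) % e
--     if y == 0:
--         y = e
--     d = (x * y + 1) // e
--     out = []
--     pw = 1                          # 66 ** index, maintained incrementally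
--     for b in blocks:
--         v = pow(b, d, n)
--         w = v % pw if (v < pw and v != 0) else v // pw
--         out.append(SYMBOLS[w])
--         pw *= 66
--     return ''.join(out)
-- ===== Notes on version B (the rewrite author's own statement) =====
-- stated objective: alternative
-- what changed: The linear scan for the decryption exponent (y += 1 until e divides x*y+1) is replaced by an extended-Euclid modular inverse, trial division stops at sqrt(n) instead of scanning towards n, and the power 66^i is maintained incrementally instead of being recomputed for every block.
-- outside the precondition, e.g. on blockSizeHack([2], 15, -7): A returns 'C', B raises ValueError
import Mathlib
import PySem

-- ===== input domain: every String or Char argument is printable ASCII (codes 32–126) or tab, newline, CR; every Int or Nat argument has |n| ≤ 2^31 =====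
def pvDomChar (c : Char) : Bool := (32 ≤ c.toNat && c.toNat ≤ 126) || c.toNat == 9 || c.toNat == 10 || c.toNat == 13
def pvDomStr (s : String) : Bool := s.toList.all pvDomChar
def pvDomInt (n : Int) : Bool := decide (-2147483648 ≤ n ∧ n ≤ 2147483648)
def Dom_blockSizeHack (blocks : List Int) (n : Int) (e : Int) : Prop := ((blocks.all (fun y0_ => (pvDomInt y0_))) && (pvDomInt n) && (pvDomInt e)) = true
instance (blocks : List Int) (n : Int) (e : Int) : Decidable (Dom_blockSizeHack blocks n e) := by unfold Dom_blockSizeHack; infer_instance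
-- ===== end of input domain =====

-- B replaces A's O(e) linear scan for the decryption exponent by extended Euclid, stops the
-- trial division at √n (keeping A's own p = q = 0 convention when no factor exists), and
-- maintains the power 66^i incrementally.  Equality of return values is claimed on Pre_
-- (outside it A raises or diverges, or B's extended Euclid naturally raises).

-- ===== PORT A =====
def pvSyms : List Char := "ABCDEFGHIJKLMNOPQRSTUVWXYZabcdefghijklmnopqrstuvwxyz1234567890 !?.".toList

-- `for i in range(2, n): if n % i == 0: p = i; q = n//p; break` (loop exited at the break)
def pvFindPQ (n : Int) (i : Int) : Int × Int :=
  if h : i < n then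
    if PySem.Int.mod n i = 0 then (i, PySem.Int.floordiv n i) else pvFindPQ n (i + 1)
  else (0, 0)
termination_by (n - i).toNat
decreasing_by omega

-- `while ((x * y) + 1) % e != 0: y += 1`; fuel e.toNat suffices on Pre_ (the answer is ≤ e)
def pvFindY (x e : Int) (y : Int) : Nat → Int
  | 0 => y
  | fuel + 1 => if PySem.Int.mod (x * y + 1) e ≠ 0 then pvFindY x e (y + 1) fuel else y

-- the block loop, appending SYMBOLS[blockInt] for i in range(len(blocks))
def pvBlocksA (blocks : List Int) (n d : Int) (i : Nat) : List Char :=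
  if h : i < blocks.length then
    (let blockInt := PySem.Int.powMod (PySem.List.pyGetD blocks (i : Int) 0) d.toNat n
     let P : Int := ((pvSyms.length : Int)) ^ i
     let w := if blockInt < P ∧ blockInt ≠ 0 then PySem.Int.mod blockInt P
              else PySem.Int.floordiv blockInt P
     PySem.List.pyGetD pvSyms w '?') :: pvBlocksA blocks n d (i + 1)
  else []
termination_by blocks.length - i

-- pow's exponent d is ≥ 1 on Pre_ (d.toNat is exact there; d < 0 makes Python's pow raise or differ, outside Pre_)
def blockSizeHack (blocks : List Int) (n : Int) (e : Int) : String :=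
  let pq := pvFindPQ n 2
  let x := (pq.1 - 1) * (pq.2 - 1)
  let y := pvFindY x e 1 e.toNat
  let d := PySem.Int.floordiv (x * y + 1) e
  String.ofList (pvBlocksA blocks n d 0)

-- ===== PORT B =====
-- trial division `while i*i <= n`, p = q = 0 when no factor is found
def pvFindPQ2 (n : Int) (i : Int) : Int × Int :=
  if h : i * i ≤ n then
    if PySem.Int.mod n i = 0 then (i, PySem.Int.floordiv n i) else pvFindPQ2 n (i + 1)
  else (0, 0)
termination_by (n + 1 - i).toNat
decreasing_by
  have hin : i ≤ n := by nlinarith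
  omega

-- extended Euclid loop of Source B, returning (r0, s0); fuel e.toNat suffices on Pre_ (r1 < e and strictly decreasing)
def pvEgcd (r0 r1 s0 s1 : Int) : Nat → Int × Int
  | 0 => (r0, s0)
  | fuel + 1 =>
    if r1 ≠ 0 then
      let k := PySem.Int.floordiv r0 r1
      pvEgcd r1 (r0 - k * r1) s1 (s0 - k * s1) fuel
    else (r0, s0)

def pvBlocksB (n d : Int) (bs : List Int) (pw : Int) : List Char :=
  match bs with
  | [] => []
  | b :: t =>
    let v := PySem.Int.powMod b d.toNat n
    let w := if v < pw ∧ v ≠ 0 then PySem.Int.mod v pw else PySem.Int.floordiv v pw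
    PySem.List.pyGetD pvSyms w '?' :: pvBlocksB n d t (pw * 66)

-- Source B's `raise ValueError` branch (extended-Euclid gcd ≠ 1) lies outside Pre_
def blockSizeHack_alt (blocks : List Int) (n : Int) (e : Int) : String :=
  let pq := pvFindPQ2 n 2
  let x := (pq.1 - 1) * (pq.2 - 1)
  let rs := pvEgcd e (PySem.Int.mod x e) 0 1 e.toNat
  let y0 := PySem.Int.mod (-rs.2) e
  let y := if y0 = 0 then e else y0
  let d := PySem.Int.floordiv (x * y + 1) e
  String.ofList (pvBlocksB n d blocks 1)

-- ===== PRECONDITION & SPEC =====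
-- Helpers describing the inputs' φ(n) = x and decryption exponent d (no port is referenced).
-- pvP0 n is the least factor of n in [2, √n] and 0 if none — the p both programs compute; it is
-- spelled as a fueled search only because the witness probe must evaluate Pre_ by `decide`
-- (Nat.minFac's well-founded recursion does not kernel-reduce); the lemmas below the claim
-- relate it to Nat.minFac.
def pvFacAux (n : Int) : Nat → Int → Int
  | 0, _ => 0
  | fuel + 1, i => if i * i ≤ n then (if n % i = 0 then i else pvFacAux n fuel (i + 1)) else 0
def pvP0 (n : Int) : Int := pvFacAux n n.toNat 2
def pvQ0 (n : Int) : Int := if pvP0 n = 0 then 0 else PySem.Int.floordiv n (pvP0 n)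
def pvX (n : Int) : Int := (pvP0 n - 1) * (pvQ0 n - 1)
def pvYc (n e : Int) : Int :=
  if (-(Int.gcdA (pvX n) e)) % e = 0 then e else (-(Int.gcdA (pvX n) e)) % e
def pvDc (n e : Int) : Int := PySem.Int.floordiv (pvX n * pvYc n e + 1) e
-- the symbol index A computes for block i (to state "no IndexError")
def pvW (blocks : List Int) (n e : Int) (i : Nat) : Int :=
  let v := PySem.Int.powMod (blocks.getD i 0) (pvDc n e).toNat n
  if v < 66 ^ i ∧ v ≠ 0 then PySem.Int.mod v (66 ^ i) else PySem.Int.floordiv v (66 ^ i)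

-- Pre_ excludes: n = 0 (pow raises ZeroDivisionError in A and B); e ≤ 0 (A raises or diverges
-- except for rare invertible-blocks inputs, on which B's extended Euclid naturally raises
-- ValueError); gcd(φ(n), e) ≠ 1 (A's y-search diverges, B raises ValueError); and blocks whose
-- decoded symbol index reaches 66, where A raises IndexError.
def Pre_blockSizeHack (blocks : List Int) (n : Int) (e : Int) : Prop :=
  n ≠ 0 ∧ 1 ≤ e ∧ Int.gcd (pvX n) e = 1 ∧ ∀ i < blocks.length, pvW blocks n e i < 66
instance (blocks : List Int) (n : Int) (e : Int) : Decidable (Pre_blockSizeHack blocks n e) := by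
  unfold Pre_blockSizeHack; infer_instance

def pvWitness_blockSizeHack : List Int × Int × Int := ([2, 3, 4], 33, 7)

def Spec_blockSizeHack (blocks : List Int) (n : Int) (e : Int) (out : String) : Prop := out = blockSizeHack_alt blocks n e
instance (blocks : List Int) (n : Int) (e : Int) (out : String) : Decidable (Spec_blockSizeHack blocks n e out) := by unfold Spec_blockSizeHack; infer_instance

-- ===== CLAIM (what is proved, stated in full; the proofs are below) =====
def Claim_equal_blockSizeHack : Prop := ∀ (blocks : List Int) (n : Int) (e : Int), Dom_blockSizeHack blocks n e → Pre_blockSizeHack blocks n e → Spec_blockSizeHack blocks n e (blockSizeHack blocks n e)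

-- ===== LEMMAS AND PROOFS =====

-- A's factor scan hits the least factor p
theorem pvFindPQ_eq (n p : Int) (hp2 : 2 ≤ p) (hpn : p < n) (hdvd : p ∣ n)
    (hmin : ∀ j : Int, 2 ≤ j → j < p → ¬ j ∣ n) :
    ∀ (k : Nat) (i : Int), 2 ≤ i → i ≤ p → (p - i).toNat = k →
      pvFindPQ n i = (p, PySem.Int.floordiv n p) := by
  intro k
  induction k with
  | zero =>
    intro i h2 hip hk
    have : i = p := by omega
    subst this
    rw [pvFindPQ, dif_pos (by omega : i < n),
      if_pos ((PySem.Int.mod_eq_zero_iff_dvd n i).mpr hdvd)]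
  | succ k ih =>
    intro i h2 hip hk
    have hin : i < n := by omega
    by_cases hc : i = p
    · subst hc
      rw [pvFindPQ, dif_pos hin, if_pos ((PySem.Int.mod_eq_zero_iff_dvd n i).mpr hdvd)]
    · have hilt : i < p := by omega
      have hnd : ¬ i ∣ n := hmin i h2 hilt
      rw [pvFindPQ, dif_pos hin,
        if_neg (by simpa [PySem.Int.mod_eq_zero_iff_dvd] using hnd)]
      exact ih (i + 1) (by omega) (by omega) (by omega)

-- when n has no factor at all in [2, n), A's scan falls through with (0, 0)
theorem pvFindPQ_none (n : Int) (hnone : ∀ j : Int, 2 ≤ j → j < n → ¬ j ∣ n) :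
    ∀ (k : Nat) (i : Int), 2 ≤ i → (n - i).toNat ≤ k → pvFindPQ n i = (0, 0) := by
  intro k
  induction k with
  | zero =>
    intro i h2 hk
    rw [pvFindPQ, dif_neg (by omega)]
  | succ k ih =>
    intro i h2 hk
    by_cases hin : i < n
    · have hnd : ¬ i ∣ n := hnone i h2 hin
      rw [pvFindPQ, dif_pos hin,
        if_neg (by simpa [PySem.Int.mod_eq_zero_iff_dvd] using hnd)]
      exact ih (i + 1) (by omega) (by omega)
    · rw [pvFindPQ, dif_neg hin]

-- B's √n scan hits the same least factor
theorem pvFindPQ2_eq (n p : Int) (hp2 : 2 ≤ p) (hpp : p * p ≤ n) (hdvd : p ∣ n)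
    (hmin : ∀ j : Int, 2 ≤ j → j < p → ¬ j ∣ n) :
    ∀ (k : Nat) (i : Int), 2 ≤ i → i ≤ p → (p - i).toNat = k →
      pvFindPQ2 n i = (p, PySem.Int.floordiv n p) := by
  intro k
  induction k with
  | zero =>
    intro i h2 hip hk
    have : i = p := by omega
    subst this
    rw [pvFindPQ2, dif_pos hpp, if_pos ((PySem.Int.mod_eq_zero_iff_dvd n i).mpr hdvd)]
  | succ k ih =>
    intro i h2 hip hk
    have hii : i * i ≤ n := le_trans (by nlinarith) hpp
    by_cases hc : i = p
    · subst hc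
      rw [pvFindPQ2, dif_pos hii, if_pos ((PySem.Int.mod_eq_zero_iff_dvd n i).mpr hdvd)]
    · have hilt : i < p := by omega
      have hnd : ¬ i ∣ n := hmin i h2 hilt
      rw [pvFindPQ2, dif_pos hii,
        if_neg (by simpa [PySem.Int.mod_eq_zero_iff_dvd] using hnd)]
      exact ih (i + 1) (by omega) (by omega) (by omega)

-- and falls through with (0, 0) when there is no factor up to √n
theorem pvFindPQ2_none (n : Int) (hnone : ∀ j : Int, 2 ≤ j → j * j ≤ n → ¬ j ∣ n) :
    ∀ (k : Nat) (i : Int), 2 ≤ i → (n + 1 - i).toNat ≤ k → pvFindPQ2 n i = (0, 0) := by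
  intro k
  induction k with
  | zero =>
    intro i h2 hk
    have hni : n < i := by omega
    rw [pvFindPQ2, dif_neg (by nlinarith)]
  | succ k ih =>
    intro i h2 hk
    by_cases hii : i * i ≤ n
    · have hnd : ¬ i ∣ n := hnone i h2 hii
      have hin : i ≤ n := by nlinarith
      rw [pvFindPQ2, dif_pos hii,
        if_neg (by simpa [PySem.Int.mod_eq_zero_iff_dvd] using hnd)]
      exact ih (i + 1) (by omega) (by omega)
    · rw [pvFindPQ2, dif_neg hii]

-- the Pre_-side fueled least-factor search also hits the least factor …
theorem pvFacAux_eq (n p : Int) (hp2 : 2 ≤ p) (hpp : p * p ≤ n) (hdvd : p ∣ n)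
    (hmin : ∀ j : Int, 2 ≤ j → j < p → ¬ j ∣ n) :
    ∀ (k : Nat) (i : Int), 2 ≤ i → i ≤ p → (p - i).toNat < k →
      pvFacAux n k i = p := by
  intro k
  induction k with
  | zero =>
    intro i h2 hip hk
    omega
  | succ k ih =>
    intro i h2 hip hk
    have hii : i * i ≤ n := le_trans (by nlinarith) hpp
    by_cases hc : i = p
    · subst hc
      simp only [pvFacAux, if_pos hii]
      rw [if_pos (Int.emod_eq_zero_of_dvd hdvd)]
    · have hilt : i < p := by omega
      have hnd : ¬ i ∣ n := hmin i h2 hilt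
      simp only [pvFacAux, if_pos hii]
      rw [if_neg (fun hm => hnd (Int.dvd_of_emod_eq_zero hm))]
      exact ih (i + 1) (by omega) (by omega) (by omega)

-- … and returns 0 when there is none
theorem pvFacAux_none (n : Int) (hnone : ∀ j : Int, 2 ≤ j → j * j ≤ n → ¬ j ∣ n) :
    ∀ (k : Nat) (i : Int), 2 ≤ i → pvFacAux n k i = 0 := by
  intro k
  induction k with
  | zero => intro i _; rfl
  | succ k ih =>
    intro i h2
    by_cases hii : i * i ≤ n
    · have hnd : ¬ i ∣ n := hnone i h2 hii
      simp only [pvFacAux, if_pos hii]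
      rw [if_neg (fun hm => hnd (Int.dvd_of_emod_eq_zero hm))]
      exact ih (i + 1) (by omega)
    · simp only [pvFacAux, if_neg hii]

-- A's y-scan returns the unique admissible y
theorem pvFindY_eq (x e t : Int) (ht : e ∣ x * t + 1)
    (hmin : ∀ z : Int, 1 ≤ z → z < t → ¬ e ∣ x * z + 1) :
    ∀ (fuel : Nat) (y : Int), 1 ≤ y → y ≤ t → (t - y).toNat ≤ fuel →
      (∀ z : Int, y ≤ z → z < t → ¬ e ∣ x * z + 1) →
      pvFindY x e y fuel = t := by
  intro fuel
  induction fuel with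
  | zero =>
    intro y h1 hyt hf _
    have : y = t := by omega
    simpa [pvFindY] using this
  | succ fuel ih =>
    intro y h1 hyt hf hr
    by_cases hc : PySem.Int.mod (x * y + 1) e = 0
    · have hdv : e ∣ x * y + 1 := (PySem.Int.mod_eq_zero_iff_dvd _ _).mp hc
      have hyt2 : y = t := by
        by_contra hne
        exact hr y le_rfl (by omega) hdv
      subst hyt2
      simp only [pvFindY]
      rw [if_neg (by simp [hc])]
    · have hnd : ¬ e ∣ x * y + 1 := fun hdv => hc ((PySem.Int.mod_eq_zero_iff_dvd _ _).mpr hdv)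
      have hyt' : y < t := by
        rcases lt_or_eq_of_le hyt with h | h
        · exact h
        · exact absurd (h ▸ ht) hnd
      simp only [pvFindY]
      rw [if_pos hc]
      exact ih (y + 1) (by omega) (by omega) (by omega)
        (fun z hz hzt => hr z (by omega) hzt)

-- the extended-Euclid loop computes the gcd together with a Bézout coefficient mod e
theorem pvEgcd_spec (x e : Int) :
    ∀ (fuel : Nat) (r0 r1 s0 s1 : Int), 0 ≤ r1 → r1 < r0 → r1.toNat ≤ fuel →
      Int.gcd r0 r1 = Int.gcd x e →
      s0 * x ≡ r0 [ZMOD e] → s1 * x ≡ r1 [ZMOD e] →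
      (pvEgcd r0 r1 s0 s1 fuel).1 = (Int.gcd x e : Int) ∧
        (pvEgcd r0 r1 s0 s1 fuel).2 * x ≡ (Int.gcd x e : Int) [ZMOD e] := by
  intro fuel
  induction fuel with
  | zero =>
    intro r0 r1 s0 s1 h0 h01 hf hg hs0 hs1
    have hr1 : r1 = 0 := by omega
    subst hr1
    have hr0 : r0 = (Int.gcd x e : Int) := by
      rw [← hg, Int.gcd_zero_right, Int.natAbs_of_nonneg (by omega)]
    simp only [pvEgcd]
    exact ⟨hr0, hr0 ▸ hs0⟩
  | succ fuel ih =>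
    intro r0 r1 s0 s1 h0 h01 hf hg hs0 hs1
    by_cases hz : r1 = 0
    · subst hz
      have hr0 : r0 = (Int.gcd x e : Int) := by
        rw [← hg, Int.gcd_zero_right, Int.natAbs_of_nonneg (by omega)]
      simp only [pvEgcd]
      rw [if_neg (fun h => h rfl)]
      exact ⟨hr0, hr0 ▸ hs0⟩
    · have hpos : 0 < r1 := by omega
      simp only [pvEgcd, if_pos hz]
      have hk : PySem.Int.floordiv r0 r1 = r0 / r1 := PySem.Int.floordiv_eq_ediv_of_pos hpos
      rw [hk]
      have hrem : r0 - r0 / r1 * r1 = r0 % r1 := by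
        have h := Int.mul_ediv_add_emod r0 r1
        linarith [h]
      rw [hrem]
      have hg' : Int.gcd r1 (r0 % r1) = Int.gcd x e := by
        rw [Int.gcd_comm, Int.gcd_emod, ← hg, Int.gcd_comm]
      have hb1 : 0 ≤ r0 % r1 := Int.emod_nonneg r0 hz
      have hb2 : r0 % r1 < r1 := Int.emod_lt_of_pos r0 hpos
      refine ih r1 (r0 % r1) s1 (s0 - r0 / r1 * s1) hb1 hb2 (by omega) hg' hs1 ?_
      · have h2 : (s0 - r0 / r1 * s1) * x = s0 * x - r0 / r1 * (s1 * x) := by ring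
        rw [h2, ← hrem]
        have := hs0.sub (hs1.mul_left (r0 / r1))
        simpa using this

-- there is only one y in [1, e] with e ∣ x*y + 1 when gcd(x, e) = 1
theorem pvY_unique (x e y1 y2 : Int) (hg : Int.gcd x e = 1)
    (h11 : 1 ≤ y1) (h12 : y1 ≤ e) (h13 : e ∣ x * y1 + 1)
    (h21 : 1 ≤ y2) (h22 : y2 ≤ e) (h23 : e ∣ x * y2 + 1) : y1 = y2 := by
  have hd : e ∣ (y1 - y2) * x := by
    have : (y1 - y2) * x = (x * y1 + 1) - (x * y2 + 1) := by ring
    rw [this]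
    exact dvd_sub h13 h23
  have hco : IsCoprime (e : Int) x := by
    rw [Int.isCoprime_iff_gcd_eq_one, Int.gcd_comm]
    exact hg
  have hdv : e ∣ y1 - y2 := hco.dvd_of_dvd_mul_right hd
  have := Int.eq_zero_of_abs_lt_dvd hdv (by rw [abs_lt]; omega)
  omega

-- the canonical representative built from any Bézout coefficient is admissible
theorem pvY_canon (x e s : Int) (he : 0 < e) (hs : s * x ≡ 1 [ZMOD e]) :
    1 ≤ (if (-s) % e = 0 then e else (-s) % e) ∧
    (if (-s) % e = 0 then e else (-s) % e) ≤ e ∧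
    e ∣ x * (if (-s) % e = 0 then e else (-s) % e) + 1 := by
  set y0 : Int := (-s) % e with hy0
  have h0 : 0 ≤ y0 := Int.emod_nonneg _ (by omega)
  have h1 : y0 < e := Int.emod_lt_of_pos _ he
  have hdvd0 : e ∣ x * y0 + 1 := by
    have hm : x * y0 + 1 ≡ x * (-s) + 1 [ZMOD e] := by
      have : y0 ≡ -s [ZMOD e] := Int.emod_emod_of_dvd (-s) dvd_rfl
      exact (this.mul_left x).add_right 1
    have hz : x * (-s) + 1 ≡ 0 [ZMOD e] := by
      have : x * (-s) + 1 = -(s * x) + 1 := by ring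
      rw [this]
      have := (hs.neg).add_right 1
      simpa using this
    exact Int.modEq_zero_iff_dvd.mp (hm.trans hz)
  by_cases hz : y0 = 0
  · have he1 : e = 1 := by
      have h1d : e ∣ 1 := by simpa [hz] using hdvd0
      have := Int.le_of_dvd one_pos h1d
      omega
    simp [hz, he1]
  · simp only [if_neg hz]
    exact ⟨by omega, by omega, hdvd0⟩

-- A's scanned y equals B's extended-Euclid y
theorem pvY_main (x e : Int) (he : 1 ≤ e) (hg : Int.gcd x e = 1) :
    pvFindY x e 1 e.toNat
      = (if PySem.Int.mod (-(pvEgcd e (PySem.Int.mod x e) 0 1 e.toNat).2) e = 0 then e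
         else PySem.Int.mod (-(pvEgcd e (PySem.Int.mod x e) 0 1 e.toNat).2) e) := by
  have he' : (0 : Int) < e := by omega
  have hmodx : PySem.Int.mod x e = x % e := PySem.Int.mod_eq_emod_of_pos he'
  rw [hmodx]
  have hrs := pvEgcd_spec x e e.toNat e (x % e) 0 1
    (Int.emod_nonneg _ (by omega)) (Int.emod_lt_of_pos _ he')
    (by have := Int.emod_lt_of_pos x he'; have := Int.emod_nonneg x (show e ≠ 0 by omega); omega)
    (by rw [Int.gcd_comm]; exact Int.gcd_emod _ _)
    (by simpa using (Int.modEq_zero_iff_dvd.mpr (dvd_refl e)).symm)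
    (by
      rw [show (1 : Int) * x = x by ring]
      exact (Int.emod_emod_of_dvd x dvd_rfl : Int.ModEq e (x % e) x).symm)
  rw [hg] at hrs
  set s : Int := (pvEgcd e (x % e) 0 1 e.toNat).2 with hsdef
  have hsx : s * x ≡ 1 [ZMOD e] := by simpa using hrs.2
  have hcanon := pvY_canon x e s he' hsx
  set yB : Int := (if (-s) % e = 0 then e else (-s) % e) with hyB
  have hmin2 : ∀ z : Int, 1 ≤ z → z < yB → ¬ e ∣ x * z + 1 := by
    intro z h1 h2 hdv
    have := pvY_unique x e z yB hg h1 (by omega) hdv hcanon.1 hcanon.2.1 hcanon.2.2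
    omega
  have hyA : pvFindY x e 1 e.toNat = yB :=
    pvFindY_eq x e yB hcanon.2.2 hmin2 e.toNat 1 le_rfl hcanon.1 (by omega)
      (fun z hz hzt => hmin2 z hz hzt)
  rw [hyA, PySem.Int.mod_eq_emod_of_pos he']

-- the two block loops agree (pw tracks 66^i = len(SYMBOLS)^i)
theorem pvBlocks_eq (blocks : List Int) (n d : Int) :
    ∀ (k : Nat) (i : Nat), i ≤ blocks.length → blocks.length - i = k →
      pvBlocksA blocks n d i = pvBlocksB n d (blocks.drop i) ((66 : Int) ^ i) := by
  intro k
  induction k with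
  | zero =>
    intro i hi hk
    have hie : i = blocks.length := by omega
    rw [pvBlocksA, dif_neg (by omega), hie, List.drop_length, pvBlocksB]
  | succ k ih =>
    intro i hi hk
    have hil : i < blocks.length := by omega
    rw [pvBlocksA, dif_pos hil, List.drop_eq_getElem_cons hil, pvBlocksB]
    have h66 : pvSyms.length = 66 := rfl
    have hP : ((pvSyms.length : Int)) ^ i = (66 : Int) ^ i := by rw [h66]; norm_num
    have hget : PySem.List.pyGetD blocks (i : Int) 0 = blocks[i] := by
      rw [PySem.List.pyGetD_natCast, List.getD_eq_getElem _ _ hil]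
    have hpw : (66 : Int) ^ i * 66 = (66 : Int) ^ (i + 1) := (pow_succ 66 i).symm
    have hrec := ih (i + 1) (by omega) (by omega)
    simp only [hP, hget, hpw, hrec]

-- ===== VERDICT (by name: the statement is the Claim_ definition above) =====
theorem blockSizeHack_spec : Claim_equal_blockSizeHack := by
  intro blocks n e _hdom hpre
  obtain ⟨hn0, he, hg, _hidx⟩ := hpre
  unfold Spec_blockSizeHack
  simp only [blockSizeHack, blockSizeHack_alt]
  by_cases hfac : ∃ j : Int, 2 ≤ j ∧ j * j ≤ n ∧ j ∣ n
  · -- n has a factor ≤ √n: both scans find the least one, which is Nat.minFac n.toNat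
    obtain ⟨j0, hj2, hjj, hjd⟩ := hfac
    have h4 : 4 ≤ n := by nlinarith
    have hN : ((n.toNat : Int)) = n := Int.toNat_of_nonneg (by omega)
    have hj0n : j0 < n := by nlinarith
    have hnp : ¬ (n.toNat).Prime := by
      intro hp
      have hjN : j0.toNat ∣ n.toNat := by
        have hj : ((j0.toNat : Int)) = j0 := Int.toNat_of_nonneg (by omega)
        rw [← hj, ← hN] at hjd
        exact_mod_cast hjd
      rcases (Nat.Prime.eq_one_or_self_of_dvd hp _ hjN) with h | h
      · omega
      · omega
    have hNprime : (n.toNat.minFac).Prime := Nat.minFac_prime (by omega)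
    set P : Int := (n.toNat.minFac : Int) with hPdef
    have hp2 : 2 ≤ P := by rw [hPdef]; exact_mod_cast hNprime.two_le
    have hdvd : P ∣ n := by rw [hPdef, ← hN]; exact_mod_cast Nat.minFac_dvd n.toNat
    have hsq : P * P ≤ n := by
      have hs := Nat.minFac_sq_le_self (n := n.toNat) (by omega) hnp
      rw [pow_two] at hs
      rw [hPdef, ← hN]
      exact_mod_cast hs
    have hplt : P < n := by nlinarith
    have hmin : ∀ j : Int, 2 ≤ j → j < P → ¬ j ∣ n := by
      intro j hj2' hjp hdv
      have hj : ((j.toNat : Int)) = j := Int.toNat_of_nonneg (by omega)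
      have hdvN : j.toNat ∣ n.toNat := by
        rw [← hj, ← hN] at hdv
        exact_mod_cast hdv
      have hle : n.toNat.minFac ≤ j.toNat := Nat.minFac_le_of_dvd (by omega) hdvN
      have : P ≤ j := by rw [hPdef, ← hj]; exact_mod_cast hle
      omega
    have hP0 : pvP0 n = P :=
      pvFacAux_eq n P hp2 hsq hdvd hmin n.toNat 2 le_rfl (by omega) (by omega)
    have hPQ := pvFindPQ_eq n P hp2 hplt hdvd hmin (P - 2).toNat 2 le_rfl (by omega) rfl
    have hPQ2 := pvFindPQ2_eq n P hp2 hsq hdvd hmin (P - 2).toNat 2 le_rfl (by omega) rfl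
    rw [hPQ, hPQ2]
    simp only []
    have hx : (P - 1) * (PySem.Int.floordiv n P - 1) = pvX n := by
      rw [pvX, pvQ0, hP0, if_neg (by omega)]
    rw [hx, pvY_main (pvX n) e he hg]
    have := pvBlocks_eq blocks n
      (PySem.Int.floordiv
        (pvX n *
          (if PySem.Int.mod (-(pvEgcd e (PySem.Int.mod (pvX n) e) 0 1 e.toNat).2) e = 0 then e
           else PySem.Int.mod (-(pvEgcd e (PySem.Int.mod (pvX n) e) 0 1 e.toNat).2) e) + 1) e)
      blocks.length 0 (by omega) (by omega)
    exact congrArg String.ofList (by simpa using this)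
  · -- no factor up to √n: both scans fall through, p = q = 0 and x = 1
    push Not at hfac
    have hnofac : ∀ j : Int, 2 ≤ j → j * j ≤ n → ¬ j ∣ n := fun j h1 h2 => hfac j h1 h2
    have hnone2 : ∀ j : Int, 2 ≤ j → j < n → ¬ j ∣ n := by
      intro j h2 hjn hdv
      rcases hdv with ⟨m, hm⟩
      have hn2 : 2 ≤ n := by omega
      have hm1 : 1 ≤ m := by nlinarith
      have hm2 : 2 ≤ m := by
        by_contra hlt
        have hm1' : m = 1 := by omega
        subst hm1'
        omega
      rcases le_total j m with h | h
      · exact hnofac j h2 (by nlinarith) ⟨m, hm⟩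
      · exact hnofac m hm2 (by nlinarith) ⟨j, by rw [hm]; ring⟩
    have hPQ := pvFindPQ_none n hnone2 (n - 2).toNat 2 le_rfl le_rfl
    have hPQ2 := pvFindPQ2_none n hnofac (n + 1 - 2).toNat 2 le_rfl le_rfl
    have hP0 : pvP0 n = 0 := pvFacAux_none n hnofac n.toNat 2 le_rfl
    rw [hPQ, hPQ2]
    simp only []
    have hx : ((0 : Int) - 1) * ((0 : Int) - 1) = pvX n := by
      rw [pvX, pvQ0, hP0]
      norm_num
    rw [hx, pvY_main (pvX n) e he hg]
    have := pvBlocks_eq blocks n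
      (PySem.Int.floordiv
        (pvX n *
          (if PySem.Int.mod (-(pvEgcd e (PySem.Int.mod (pvX n) e) 0 1 e.toNat).2) e = 0 then e
           else PySem.Int.mod (-(pvEgcd e (PySem.Int.mod (pvX n) e) 0 1 e.toNat).2) e) + 1) e)
      blocks.length 0 (by omega) (by omega)
    exact congrArg String.ofList (by simpa using this)
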